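-- pv_equiv track=rewrite | github.com/alisakrois/playground | tests/tribit.py | split_stage_on_elementary_pyramids
-- ===== SOURCE A (Python) =====
-- def split_stage_on_elementary_pyramids(stage):
--     """
-- The function takes a string containing one stage of the pyramid,
-- and returns a simple list of elementary pyramids entering this stage.
--     """
--
--     white_pyramids = []     # list of normal elementary pyramids
--     black_pyramids = []     # list of upside-down elementary pyramids
--     elementary_pyramids = []
--
--     # calculate the number elementary pyramids in stage
--     amount_of_white_pyramids = len(stage) // 8 + 1
--     amount_of_black_pyramids = len(stage) // 8
--     amount_of_base_elements = amount_of_white_pyramids*3 + amount_of_black_pyramids    # amount of elements in first row of stage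
--
--     for idx in range(0, amount_of_base_elements, 4):
--         white_pyramids.append(stage[idx:idx+3]+stage[idx+amount_of_base_elements])
--
--     for idx in range(0, amount_of_base_elements - 4, 4):
--         black_pyramids.append(stage[idx+amount_of_base_elements+1:idx+amount_of_base_elements + 4] + stage[idx+3])
--
--     for idx in range(amount_of_black_pyramids):
--         elementary_pyramids.append(white_pyramids[idx])
--         elementary_pyramids.append(black_pyramids[idx])
--
--     elementary_pyramids.append(white_pyramids[-1])
--     return elementary_pyramids
-- ===== SOURCE B (Python) =====
-- def split_stage_on_elementary_pyramids(stage):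
--     """Recursive peel: cut the stage once into its two rows, then repeatedly
--     peel one white and one black pyramid off the fronts of both rows."""
--     k = len(stage) // 8
--     base = 4 * k + 3
--     return _pyramids(stage[:base], stage[base:])
--
--
-- def _pyramids(top, bottom):
--     if len(top) <= 3:
--         return [top + bottom[0]]
--     return [top[:3] + bottom[0], bottom[1:4] + top[3]] + _pyramids(top[4:], bottom[4:])
-- ===== Notes on version B (the rewrite author's own statement) =====
-- stated objective: alternative
-- what changed: B cuts the stage once into its two rows and then recursively peels one white and one black pyramid off the fronts of both rows, consuming the strings, instead of A's three index-driven loops that build separate white and black lists and interleave them.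
import Mathlib
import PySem

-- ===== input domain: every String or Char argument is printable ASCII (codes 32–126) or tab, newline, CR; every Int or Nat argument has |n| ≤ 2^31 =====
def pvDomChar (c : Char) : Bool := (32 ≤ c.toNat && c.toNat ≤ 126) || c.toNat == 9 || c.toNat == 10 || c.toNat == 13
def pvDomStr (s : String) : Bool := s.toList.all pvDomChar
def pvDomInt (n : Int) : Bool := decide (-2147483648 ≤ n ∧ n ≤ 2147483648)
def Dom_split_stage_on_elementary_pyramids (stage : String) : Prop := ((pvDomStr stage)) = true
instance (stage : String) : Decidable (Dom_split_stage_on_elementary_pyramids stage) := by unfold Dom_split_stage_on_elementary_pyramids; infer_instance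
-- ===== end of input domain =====

-- B cuts the stage once into its two rows and recursively peels one white and one
-- black pyramid off the fronts of both rows, instead of A's three index loops;
-- objective: alternative (genuinely different decomposition, same cost).

-- ===== PORT A =====
-- Literal transliteration over the code points stage.toList.  Single-char indexing
-- stage[i] is ported with PySem.List.pyGetD; the defaults are reached exactly where
-- Python raises IndexError, and those inputs are excluded by Pre_ below.
def split_stage_on_elementary_pyramids (stage : String) : List String :=
  let cs := stage.toList
  let amount_of_white_pyramids : Int := PySem.Int.floordiv (cs.length : Int) 8 + 1
  let amount_of_black_pyramids : Int := PySem.Int.floordiv (cs.length : Int) 8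
  let amount_of_base_elements : Int := amount_of_white_pyramids * 3 + amount_of_black_pyramids
  let white_pyramids : List String := (PySem.List.pyRange 0 amount_of_base_elements 4).foldl
    (fun acc idx => acc ++ [String.ofList (PySem.List.slice cs (some idx) (some (idx + 3)) ++
        [PySem.List.pyGetD cs (idx + amount_of_base_elements) ' '])]) []
  let black_pyramids : List String := (PySem.List.pyRange 0 (amount_of_base_elements - 4) 4).foldl
    (fun acc idx => acc ++ [String.ofList (PySem.List.slice cs (some (idx + amount_of_base_elements + 1)) (some (idx + amount_of_base_elements + 4)) ++
        [PySem.List.pyGetD cs (idx + 3) ' '])]) []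
  let elementary_pyramids : List String := (PySem.List.pyRange 0 amount_of_black_pyramids 1).foldl
    (fun acc idx => acc ++ [PySem.List.pyGetD white_pyramids idx ""] ++ [PySem.List.pyGetD black_pyramids idx ""]) []
  elementary_pyramids ++ [PySem.List.pyGetD white_pyramids (-1) ""]

-- ===== PORT B =====
-- Transliteration of Source B's recursive helper _pyramids over code points.  bottom[0]
-- and top[3] are ported with List.getD; the default is reached exactly where Python
-- raises IndexError (excluded by Pre_ below).  All slice bounds in Source B are small
-- nonnegative naturals, so top[:3] is .take 3 and bottom[1:4] is (.drop 1).take 3.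
def pvPyramids (top bottom : List Char) : List String :=
  if top.length ≤ 3 then
    [String.ofList (top ++ [bottom.getD 0 ' '])]
  else
    [String.ofList (top.take 3 ++ [bottom.getD 0 ' ']),
     String.ofList ((bottom.drop 1).take 3 ++ [top.getD 3 ' '])] ++
    pvPyramids (top.drop 4) (bottom.drop 4)
termination_by top.length
decreasing_by simp; omega

def split_stage_on_elementary_pyramids_alt (stage : String) : List String :=
  let cs := stage.toList
  let k : Nat := cs.length / 8
  let base : Nat := 4 * k + 3
  pvPyramids (cs.take base) (cs.drop base)

-- ===== PRECONDITION & SPEC =====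
-- Exactly the inputs on which Python A returns normally: A indexes stage[4*k + base]
-- (k = len//8, base = 4*k+3), which is in range iff len(stage) % 8 >= 4; otherwise
-- A raises IndexError (and B raises there too).
def Pre_split_stage_on_elementary_pyramids (stage : String) : Prop :=
  4 ≤ PySem.Int.mod ((stage.toList.length : Int)) 8
instance (stage : String) : Decidable (Pre_split_stage_on_elementary_pyramids stage) := by
  unfold Pre_split_stage_on_elementary_pyramids; infer_instance

def pvWitness_split_stage_on_elementary_pyramids : String := "abcd"

def Spec_split_stage_on_elementary_pyramids (stage : String) (out : List String) : Prop := out = split_stage_on_elementary_pyramids_alt stage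
instance (stage : String) (out : List String) : Decidable (Spec_split_stage_on_elementary_pyramids stage out) := by unfold Spec_split_stage_on_elementary_pyramids; infer_instance

-- ===== CLAIM (what is proved, stated in full; the proofs are below) =====
def Claim_equal_split_stage_on_elementary_pyramids : Prop := ∀ (stage : String), Dom_split_stage_on_elementary_pyramids stage → Pre_split_stage_on_elementary_pyramids stage → Spec_split_stage_on_elementary_pyramids stage (split_stage_on_elementary_pyramids stage)

-- ===== LEMMAS AND PROOFS =====

-- the white pyramid with index j (common normal form of both ports)
def pvW (cs : List Char) (k j : Nat) : String :=
  String.ofList ((cs.drop (4*j)).take 3 ++ [cs.getD (4*j + (4*k+3)) ' '])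

-- the black pyramid with index j
def pvB (cs : List Char) (k j : Nat) : String :=
  String.ofList ((cs.drop (4*k + 4*j + 4)).take 3 ++ [cs.getD (4*j + 3) ' '])

-- common normal form of both ports
def pvCanon (cs : List Char) (k : Nat) : List String :=
  ((List.range' 0 k).flatMap (fun i => [pvW cs k i, pvB cs k i])) ++ [pvW cs k k]

lemma pvGetD_drop (cs : List Char) (m n : Nat) (d : Char) :
    (cs.drop m).getD n d = cs.getD (m + n) d := by
  simp [List.getD, List.getElem?_drop]

lemma pvGetD_take (cs : List Char) (m n : Nat) (d : Char) (h : n < m) :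
    (cs.take m).getD n d = cs.getD n d := by
  simp [List.getD, h]


lemma pvFoldl_two (f g : Nat → String) (l : List Nat) (init : List String) :
    l.foldl (fun acc i => acc ++ [f i] ++ [g i]) init
      = init ++ l.flatMap (fun i => [f i, g i]) := by
  induction l generalizing init with
  | nil => simp
  | cons x xs ih => simp [List.append_assoc, List.flatMap]

-- B's recursion, expressed on absolute positions of cs, produces the canon tail
lemma pvPyramids_eq (cs : List Char) (k : Nat) (hlen : 4*k+3 ≤ cs.length) :
    ∀ (n j : Nat), j + n = k →
      pvPyramids ((cs.drop (4*j)).take (4*n+3)) (cs.drop (4*k+3+4*j))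
        = (List.range' j n).flatMap (fun i => [pvW cs k i, pvB cs k i]) ++ [pvW cs k k] := by
  intro n
  induction n with
  | zero =>
    intro j hj
    have hj' : j = k := by omega
    rw [hj']
    rw [pvPyramids]
    have hlt : ((cs.drop (4*k)).take 3).length ≤ 3 := by simp
    rw [if_pos hlt]
    simp only [List.range'_zero, List.flatMap_nil, List.nil_append]
    rw [pvGetD_drop]
    unfold pvW
    rw [show 4*k+3+4*k + 0 = 4*k + (4*k+3) from by omega]
  | succ n ih =>
    intro j hj
    rw [pvPyramids]
    have htl : ((cs.drop (4*j)).take (4*(n+1)+3)).length = 4*(n+1)+3 := by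
      simp; omega
    rw [if_neg (by omega)]
    have h1 : ((cs.drop (4*j)).take (4*(n+1)+3)).take 3 = (cs.drop (4*j)).take 3 := by
      rw [List.take_take, show min 3 (4*(n+1)+3) = 3 from by omega]
    have h2 : (cs.drop (4*k+3+4*j)).getD 0 ' ' = cs.getD (4*j + (4*k+3)) ' ' := by
      rw [pvGetD_drop]; congr 1; omega
    have h3 : ((cs.drop (4*k+3+4*j)).drop 1).take 3 = (cs.drop (4*k + 4*j + 4)).take 3 := by
      rw [List.drop_drop, show (4*k+3+4*j)+1 = 4*k+4*j+4 from by omega]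
    have h4 : ((cs.drop (4*j)).take (4*(n+1)+3)).getD 3 ' ' = cs.getD (4*j + 3) ' ' := by
      rw [pvGetD_take (cs.drop (4*j)) (4*(n+1)+3) 3 ' ' (by omega), pvGetD_drop]
    have h5 : ((cs.drop (4*j)).take (4*(n+1)+3)).drop 4 = (cs.drop (4*(j+1))).take (4*n+3) := by
      rw [List.drop_take, List.drop_drop,
          show 4*(n+1)+3 - 4 = 4*n+3 from by omega,
          show 4*j + 4 = 4*(j+1) from by omega]
    have h6 : (cs.drop (4*k+3+4*j)).drop 4 = cs.drop (4*k+3+4*(j+1)) := by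
      rw [List.drop_drop, show (4*k+3+4*j)+4 = 4*k+3+4*(j+1) from by omega]
    rw [h1, h2, h3, h4, h5, h6, ih (j+1) (by omega)]
    rw [List.range'_succ, List.flatMap_cons]
    simp [pvW, pvB]

lemma pvB_eq_canon (stage : String)
    (hpre : Pre_split_stage_on_elementary_pyramids stage) :
    split_stage_on_elementary_pyramids_alt stage = pvCanon stage.toList (stage.toList.length / 8) := by
  unfold split_stage_on_elementary_pyramids_alt pvCanon
  simp only []
  set cs := stage.toList with hcs
  set k := cs.length / 8 with hk
  have hmod : PySem.Int.mod ((cs.length : Int)) 8 = ((cs.length % 8 : Nat) : Int) := by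
    exact_mod_cast PySem.Int.mod_natCast cs.length 8
  unfold Pre_split_stage_on_elementary_pyramids at hpre
  rw [← hcs, hmod] at hpre
  have hr : 4 ≤ cs.length % 8 := by exact_mod_cast hpre
  have hlen : 4*k+3 ≤ cs.length := by omega
  have := pvPyramids_eq cs k hlen k 0 (by omega)
  simpa using this

lemma pvA_eq_canon (stage : String) :
    split_stage_on_elementary_pyramids stage = pvCanon stage.toList (stage.toList.length / 8) := by
  unfold split_stage_on_elementary_pyramids pvCanon
  simp only []
  set cs := stage.toList with hcs
  set k := cs.length / 8 with hk
  have hfd : PySem.Int.floordiv (cs.length : Int) 8 = (k:Int) := by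
    exact_mod_cast PySem.Int.floordiv_natCast cs.length 8
  rw [hfd]
  have hbase : ((k:Int)+1)*3 + (k:Int) = ((4*k+3 : Nat) : Int) := by push_cast; ring
  rw [hbase]
  have hw : (PySem.List.pyRange 0 ((4*k+3:Nat):Int) 4).foldl
      (fun acc idx => acc ++ [String.ofList (PySem.List.slice cs (some idx) (some (idx + 3)) ++
          [PySem.List.pyGetD cs (idx + ((4*k+3:Nat):Int)) ' '])]) []
      = (List.range (k+1)).map (pvW cs k) := by
    rw [PySem.List.pyRange_of_pos _ _ (by norm_num)]
    rw [show (if (0:Int) < ((4*k+3:Nat):Int) then ((((4*k+3:Nat):Int) - 0 + 4 - 1)/4).toNat else 0) = k+1 from by split_ifs <;> omega]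
    rw [List.foldl_map, PySem.List.foldl_append_singleton_eq_map, List.nil_append]
    apply List.map_congr_left
    intro j hj
    have h1 : (0 : Int) + 4*(j:Int) = ((4*j : Nat):Int) := by push_cast; ring
    rw [h1]
    have h2 : ((4*j:Nat):Int) + 3 = ((4*j+3:Nat):Int) := by push_cast; ring
    have h3 : ((4*j:Nat):Int) + ((4*k+3:Nat):Int) = ((4*j + (4*k+3):Nat):Int) := by push_cast; ring
    rw [h2, h3, PySem.List.slice_natCast, PySem.List.pyGetD_natCast]
    unfold pvW
    rw [show 4*j+3 - 4*j = 3 by omega]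
  have hb : (PySem.List.pyRange 0 (((4*k+3:Nat):Int) - 4) 4).foldl
      (fun acc idx => acc ++ [String.ofList (PySem.List.slice cs (some (idx + ((4*k+3:Nat):Int) + 1)) (some (idx + ((4*k+3:Nat):Int) + 4)) ++
          [PySem.List.pyGetD cs (idx + 3) ' '])]) []
      = (List.range k).map (pvB cs k) := by
    rw [PySem.List.pyRange_of_pos _ _ (by norm_num)]
    rw [show (if (0:Int) < ((4*k+3:Nat):Int) - 4 then ((((4*k+3:Nat):Int) - 4 - 0 + 4 - 1)/4).toNat else 0) = k from by split_ifs <;> omega]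
    rw [List.foldl_map, PySem.List.foldl_append_singleton_eq_map, List.nil_append]
    apply List.map_congr_left
    intro j hj
    have h1 : (0 : Int) + 4*(j:Int) + ((4*k+3:Nat):Int) + 1 = ((4*k + 4*j + 4 : Nat):Int) := by push_cast; ring
    have h2 : (0 : Int) + 4*(j:Int) + ((4*k+3:Nat):Int) + 4 = ((4*k + 4*j + 7 : Nat):Int) := by push_cast; ring
    have h3 : (0 : Int) + 4*(j:Int) + 3 = ((4*j + 3 : Nat):Int) := by push_cast; ring
    rw [h1, h2, h3, PySem.List.slice_natCast, PySem.List.pyGetD_natCast]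
    unfold pvB
    rw [show 4*k + 4*j + 7 - (4*k + 4*j + 4) = 3 by omega]
  rw [hw, hb, PySem.List.pyRange_zero_natCast, List.foldl_map]
  have hfold : (List.range k).foldl
      (fun acc (i : Nat) => acc ++ [PySem.List.pyGetD ((List.range (k+1)).map (pvW cs k)) (i:Int) ""]
                               ++ [PySem.List.pyGetD ((List.range k).map (pvB cs k)) (i:Int) ""]) []
      = (List.range k).foldl (fun acc i => acc ++ [pvW cs k i] ++ [pvB cs k i]) [] := by
    apply PySem.List.foldl_congr_mem
    intro acc i hi
    rw [List.mem_range] at hi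
    rw [PySem.List.pyGetD_natCast, PySem.List.pyGetD_natCast,
        PySem.List.getD_map_range _ _ _ _ (by omega), PySem.List.getD_map_range _ _ _ _ hi]
  rw [hfold, pvFoldl_two, List.nil_append, List.range_eq_range']
  congr 1
  rw [List.range_succ, List.map_append]
  simp only [List.map_cons, List.map_nil]
  rw [PySem.List.pyGetD_neg_one_append_singleton]

-- ===== VERDICT (by name: the statement is the Claim_ definition above) =====
theorem split_stage_on_elementary_pyramids_spec : Claim_equal_split_stage_on_elementary_pyramids := by
  intro stage _ hpre
  unfold Spec_split_stage_on_elementary_pyramids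
  rw [pvA_eq_canon, pvB_eq_canon stage hpre]
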